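-- pv_equiv track=rewrite | github.com/ksharm-67/Practicing | ResStrAdjRem.py | resultingString
-- ===== SOURCE A (Python) =====
-- def resultingString(s: str) -> str:
--     stk = []
--     if len(s) <= 1: return s
--
--     for i in range(len(s)):
--         if stk and (abs(ord(s[i]) - ord(stk[-1])) == 1 or abs(ord(s[i]) - ord(stk[-1])) == 25):
--             stk.pop()
--         else:
--             stk.append(s[i])
--
--     return "".join(stk)
-- ===== SOURCE B (Python) =====
-- def resultingString(s: str) -> str:
--     if len(s) <= 1:
--         return s
--     chars = list(s)
--     while True:
--         for i in range(len(chars) - 1):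
--             d = abs(ord(chars[i]) - ord(chars[i + 1]))
--             if d == 1 or d == 25:
--                 del chars[i:i + 2]
--                 break
--         else:
--             return "".join(chars)
-- ===== Notes on version B (the rewrite author's own statement) =====
-- stated objective: alternative
-- what changed: Replaced the single-pass stack fold with repeated leftmost-adjacent-pair removal: B scans for the first adjacent pair whose code-point distance is 1 or 25, splices it out, and restarts until no pair remains.
import Mathlib
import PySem

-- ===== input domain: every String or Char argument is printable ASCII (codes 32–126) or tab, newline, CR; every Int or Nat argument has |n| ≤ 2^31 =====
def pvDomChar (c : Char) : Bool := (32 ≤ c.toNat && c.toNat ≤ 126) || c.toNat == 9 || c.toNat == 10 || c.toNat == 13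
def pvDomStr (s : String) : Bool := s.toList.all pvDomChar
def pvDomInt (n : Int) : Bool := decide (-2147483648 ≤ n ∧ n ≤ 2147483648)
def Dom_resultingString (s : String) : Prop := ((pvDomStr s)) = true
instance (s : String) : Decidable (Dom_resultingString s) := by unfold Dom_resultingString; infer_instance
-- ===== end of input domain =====

-- B replaces A's one-pass stack with repeated leftmost-adjacent-pair removal (alternative algorithm, same return value).

-- shared character test: |ord a - ord b| is 1 or 25
def pvMtch (a b : Char) : Bool :=
  ((a.toNat : Int) - (b.toNat : Int)).natAbs == 1 || ((a.toNat : Int) - (b.toNat : Int)).natAbs == 25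

-- ===== PORT A =====
-- stack kept with top at the HEAD (Python's stk[-1]); joined reversed at the end
def pvStepA (stk : List Char) (c : Char) : List Char :=
  match stk with
  | [] => [c]
  | t :: r => if pvMtch c t then r else c :: t :: r

def resultingString (s : String) : String :=
  if s.toList.length ≤ 1 then s
  else String.ofList ((s.toList.foldl pvStepA []).reverse)

-- ===== PORT B =====
-- leftmost removal step: delete the first adjacent matching pair, none if there is none
def pvRemove1 : List Char → Option (List Char)
  | a :: b :: t => if pvMtch a b then some t else (pvRemove1 (b :: t)).map (a :: ·)
  | _ => none

theorem pvRemove1_length : ∀ (l l' : List Char), pvRemove1 l = some l' → l'.length + 2 = l.length := by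
  intro l
  induction l with
  | nil => intro l' h; simp [pvRemove1] at h
  | cons a t ih =>
    match t with
    | [] => intro l' h; simp [pvRemove1] at h
    | b :: t' =>
      intro l' h
      simp only [pvRemove1] at h
      split at h
      · cases h; simp
      · simp only [Option.map_eq_some_iff] at h
        obtain ⟨x, hx, rfl⟩ := h
        have := ih x hx
        simp at this ⊢
        omega

def pvLoopB (l : List Char) : List Char :=
  match h : pvRemove1 l with
  | some l' => pvLoopB l'
  | none => l
termination_by l.length
decreasing_by have := pvRemove1_length l l' h; omega

def resultingString_alt (s : String) : String :=
  if s.toList.length ≤ 1 then s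
  else String.ofList (pvLoopB s.toList)

-- ===== PRECONDITION & SPEC =====
def Spec_resultingString (s : String) (out : String) : Prop := out = resultingString_alt s
instance (s : String) (out : String) : Decidable (Spec_resultingString s out) := by unfold Spec_resultingString; infer_instance

-- ===== CLAIM (what is proved, stated in full; the proofs are below) =====
def Claim_equal_resultingString : Prop := ∀ (s : String), Dom_resultingString s → Spec_resultingString s (resultingString s)

-- ===== LEMMAS AND PROOFS =====

-- side condition: the next input char does not match the current stack top
def pvHeadOk (l stk : List Char) : Prop :=
  match l, stk with
  | c :: _, t :: _ => pvMtch c t = false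
  | _, _ => True

theorem pvMtch_comm (a b : Char) : pvMtch a b = pvMtch b a := by
  unfold pvMtch
  rw [show ((a.toNat : Int) - b.toNat) = -((b.toNat : Int) - a.toNat) by ring, Int.natAbs_neg]

theorem pvLoopB_some (l l' : List Char) (h : pvRemove1 l = some l') : pvLoopB l = pvLoopB l' := by
  rw [pvLoopB]; split <;> simp_all

theorem pvLoopB_none (l : List Char) (h : pvRemove1 l = none) : pvLoopB l = l := by
  rw [pvLoopB]; split <;> simp_all

-- removing the leftmost matching pair does not change the stack fold
theorem pvFold_remove : ∀ (l l' stk : List Char), pvRemove1 l = some l' → pvHeadOk l stk →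
    l.foldl pvStepA stk = l'.foldl pvStepA stk := by
  intro l
  induction l with
  | nil => intro l' stk h; simp [pvRemove1] at h
  | cons a t ih =>
    match t with
    | [] => intro l' stk h; simp [pvRemove1] at h
    | b :: t' =>
      intro l' stk h hok
      simp only [pvRemove1] at h
      have hpush : pvStepA stk a = a :: stk := by
        cases stk with
        | nil => rfl
        | cons u r => simp only [pvHeadOk] at hok; simp [pvStepA, hok]
      split at h
      · -- pvMtch a b = true : l' = t'
        cases h
        rename_i hm
        simp only [List.foldl_cons, hpush]
        have : pvStepA (a :: stk) b = stk := by
          simp [pvStepA, pvMtch_comm b a, hm]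
        rw [this]
      · -- recurse inside b :: t'
        rename_i hm
        simp only [Option.map_eq_some_iff] at h
        obtain ⟨x, hx, rfl⟩ := h
        have hok' : pvHeadOk (b :: t') (a :: stk) := by
          simp [pvHeadOk, pvMtch_comm b a]
          simpa using hm
        have := ih x (a :: stk) hx hok'
        simp only [List.foldl_cons, hpush, this]

-- with no matching pair, the fold pushes everything
theorem pvFold_nopair : ∀ (l stk : List Char), pvRemove1 l = none → pvHeadOk l stk →
    l.foldl pvStepA stk = l.reverse ++ stk := by
  intro l
  induction l with
  | nil => intro stk _ _; simp
  | cons a t ih =>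
    intro stk h hok
    have hpush : pvStepA stk a = a :: stk := by
      cases stk with
      | nil => rfl
      | cons u r => simp only [pvHeadOk] at hok; simp [pvStepA, hok]
    match t with
    | [] => simp [hpush]
    | b :: t' =>
      simp only [pvRemove1] at h
      split at h
      · exact absurd h (by simp)
      · rename_i hm
        simp only [Option.map_eq_none_iff] at h
        have hok' : pvHeadOk (b :: t') (a :: stk) := by
          simp [pvHeadOk, pvMtch_comm b a]
          simpa using hm
        have := ih (a :: stk) h hok'
        simp [hpush, this]

theorem pvFold_eq_loop : ∀ (l : List Char), l.foldl pvStepA [] = (pvLoopB l).reverse := by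
  intro l
  induction hn : l.length using Nat.strong_induction_on generalizing l with
  | _ n ih =>
    cases hr : pvRemove1 l with
    | some l' =>
      have hlen := pvRemove1_length l l' hr
      have h1 : l.foldl pvStepA [] = l'.foldl pvStepA [] := by
        apply pvFold_remove l l' [] hr
        cases l <;> simp [pvHeadOk]
      rw [h1, ih l'.length (by omega) l' rfl, pvLoopB_some l l' hr]
    | none =>
      have := pvFold_nopair l [] hr (by cases l <;> simp [pvHeadOk])
      rw [this, pvLoopB_none l hr]
      simp

-- ===== VERDICT (by name: the statement is the Claim_ definition above) =====
theorem resultingString_spec : Claim_equal_resultingString := by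
  intro s _
  unfold Spec_resultingString resultingString resultingString_alt
  split
  · rfl
  · rw [pvFold_eq_loop]
    simp
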